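-- pv_equiv track=rewrite | github.com/Yuhun-Lee/programers | 실패/Lv2_멀쩡한 사각형.py | solution
-- ===== SOURCE A (Python) =====
-- def solution(w, h):
--     h, w = max(w, h), min(w, h)
--     comax = 1
--     for i in range(1, w + 1):
--         if w % i == 0 and h % i == 0:
--             comax = i
--
--     answer = w * h - (w + h - comax)
--
--     return answer
-- ===== SOURCE B (Python) =====
-- def solution(w, h):
--     big, small = max(w, h), min(w, h)
--     comax = 1
--     if small >= 1:
--         # Euclidean algorithm: gcd of the two sides (only meaningful for positive sides)
--         a, b = big, small
--         while b > 0: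
--             a, b = b, a % b
--         comax = a
--     return small * big - (small + big - comax)
-- ===== Notes on version B (the rewrite author's own statement) =====
-- stated objective: faster
-- what changed: comax is computed with the iterative Euclidean algorithm (guarded to 1 when the smaller side is below 1, where no positive divisor scan happens) instead of scanning every candidate divisor from 1 to min(w,h); the closed-form answer line is unchanged.
import Mathlib
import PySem

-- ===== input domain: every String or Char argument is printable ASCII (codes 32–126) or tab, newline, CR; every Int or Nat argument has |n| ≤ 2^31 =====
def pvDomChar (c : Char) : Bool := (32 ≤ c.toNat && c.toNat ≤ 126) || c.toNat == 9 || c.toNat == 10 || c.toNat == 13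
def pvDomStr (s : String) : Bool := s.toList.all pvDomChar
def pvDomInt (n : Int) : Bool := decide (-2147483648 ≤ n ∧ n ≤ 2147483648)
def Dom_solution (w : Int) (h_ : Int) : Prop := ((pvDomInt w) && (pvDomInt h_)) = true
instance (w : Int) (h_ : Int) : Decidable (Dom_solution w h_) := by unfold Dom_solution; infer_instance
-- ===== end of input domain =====

-- B replaces A's O(min(w,h)) divisor scan by the Euclidean algorithm (O(log min(w,h)) iterations); same closed-form answer line.

-- ===== PORT A =====
def solution (w : Int) (h_ : Int) : Int :=
  let h := max w h_
  let w' := min w h_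
  let comax := (PySem.List.pyRange 1 (w' + 1)).foldl
    (fun comax i => if PySem.Int.mod w' i == 0 && PySem.Int.mod h i == 0 then i else comax) 1
  w' * h - (w' + h - comax)

-- ===== PORT B =====
-- iterative `a, b = b, a % b` loop of Source B, as structural recursion on b
def euclidGcd (a b : Int) : Int :=
  if h : 0 < b then euclidGcd b (PySem.Int.mod a b) else a
termination_by b.toNat
decreasing_by
  have h1 := PySem.Int.mod_nonneg a h
  have h2 := PySem.Int.mod_lt a h
  omega

def solution_alt (w : Int) (h_ : Int) : Int :=
  let big := max w h_
  let small := min w h_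
  let comax := if 1 ≤ small then euclidGcd big small else 1
  small * big - (small + big - comax)

-- ===== PRECONDITION & SPEC =====
def Spec_solution (w : Int) (h_ : Int) (out : Int) : Prop := out = solution_alt w h_
instance (w : Int) (h_ : Int) (out : Int) : Decidable (Spec_solution w h_ out) := by unfold Spec_solution; infer_instance

-- ===== CLAIM (what is proved, stated in full; the proofs are below) =====
def Claim_equal_solution : Prop := ∀ (w : Int) (h_ : Int), Dom_solution w h_ → Spec_solution w h_ (solution w h_)

-- ===== LEMMAS AND PROOFS =====

-- B's Euclidean loop computes gcd (for nonnegative arguments)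
lemma euclidGcd_eq_gcd (n : Nat) : ∀ (a b : Int), 0 ≤ a → 0 ≤ b → b.toNat = n →
    euclidGcd a b = (Int.gcd a b : Int) := by
  induction n using Nat.strong_induction_on with
  | _ n ih =>
    intro a b ha hb hn
    rw [euclidGcd]
    split_ifs with hpos
    · have h1 := PySem.Int.mod_nonneg a hpos
      have h2 := PySem.Int.mod_lt a hpos
      rw [ih (PySem.Int.mod a b).toNat (by omega) b (PySem.Int.mod a b) (le_of_lt hpos) h1 rfl]
      rw [PySem.Int.mod_eq_emod_of_pos hpos, Int.emod_def, Int.gcd_sub_mul_left_right,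
        Int.gcd_comm]
    · have hb0 : b = 0 := by omega
      subst hb0
      simp [Int.gcd, Int.natAbs_of_nonneg ha]

-- A's divisor scan up to n computes gcd once n has reached it
lemma loop_eq_gcd (w h : Int) (hw : 1 ≤ w) :
    ∀ n : Int, (Int.gcd w h : Int) ≤ n → n ≤ w →
    (PySem.List.pyRange 1 (n + 1)).foldl
      (fun comax i => if PySem.Int.mod w i == 0 && PySem.Int.mod h i == 0 then i else comax) 1
      = (Int.gcd w h : Int) := by
  have hg1 : (1 : Int) ≤ (Int.gcd w h : Int) := by
    have : 0 < Int.gcd w h := Int.gcd_pos_iff.mpr (Or.inl (by omega))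
    exact_mod_cast this
  intro n hgn
  induction n, hgn using Int.le_induction with
  | base =>
    intro _
    rw [PySem.List.pyRange_one_succ_right (by omega), List.foldl_append]
    simp only [List.foldl]
    have hdw : (PySem.Int.mod w (Int.gcd w h : Int) == 0) = true := by
      simp [PySem.Int.mod_eq_zero_iff_dvd, Int.gcd_dvd_left]
    have hdh : (PySem.Int.mod h (Int.gcd w h : Int) == 0) = true := by
      simp [PySem.Int.mod_eq_zero_iff_dvd, Int.gcd_dvd_right]
    simp [hdw, hdh]
  | succ n hgn ih =>
    intro hnw
    rw [PySem.List.pyRange_one_succ_right (by omega), List.foldl_append]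
    simp only [List.foldl]
    have hcond : (PySem.Int.mod w (n + 1) == 0 && PySem.Int.mod h (n + 1) == 0) = false := by
      by_contra hc
      have hc' : (PySem.Int.mod w (n + 1) == 0 && PySem.Int.mod h (n + 1) == 0) = true := by
        revert hc; cases (PySem.Int.mod w (n + 1) == 0 && PySem.Int.mod h (n + 1) == 0) <;> simp
      simp only [Bool.and_eq_true, beq_iff_eq, PySem.Int.mod_eq_zero_iff_dvd] at hc'
      have hct : (((n + 1).toNat : Nat) : Int) = n + 1 := by omega
      have hdvd : (n + 1).toNat ∣ Int.gcd w h :=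
        Int.dvd_gcd (by rw [hct]; exact hc'.1) (by rw [hct]; exact hc'.2)
      have hg0 : 0 < Int.gcd w h := by exact_mod_cast lt_of_lt_of_le zero_lt_one hg1
      have hle := Nat.le_of_dvd hg0 hdvd
      omega
    rw [hcond]
    simp only [Bool.false_eq_true, if_false]
    exact ih (by omega)

-- ===== VERDICT (by name: the statement is the Claim_ definition above) =====
theorem solution_spec : Claim_equal_solution := by
  intro w h_ _
  show solution w h_ = solution_alt w h_
  unfold solution solution_alt
  dsimp only
  by_cases hs : 1 ≤ min w h_
  · have hwh : min w h_ ≤ max w h_ := min_le_max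
    rw [if_pos hs]
    rw [loop_eq_gcd (min w h_) (max w h_) hs (min w h_)
      (Int.le_of_dvd (by omega) (Int.gcd_dvd_left _ _)) le_rfl]
    rw [euclidGcd_eq_gcd (min w h_).toNat (max w h_) (min w h_) (by omega) (by omega) rfl]
    rw [Int.gcd_comm]
  · rw [if_neg hs]
    rw [PySem.List.pyRange_one_eq_nil (by omega)]
    simp
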